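-- pv_equiv track=rewrite | github.com/badesrapankaj/Audit_Dashboard | utils_shared.py | sheet_key_match_ops
-- ===== SOURCE A (Python) =====
-- from typing import Dict, List, Tuple, Optional
--
-- EXPECTED_SHEETS_OPS = {
--     "ta_recovery":      ["ta recovery", "ta_recovery", "ta"],
--     "business_report":  ["business report", "business_report", "business"],
--     "rep_verification": ["rep verification", "rep_verification", "rep verification "],
--     "heat_map":         ["heat map", "heatmap", "heat map "],  # display only
-- }
--
-- def sheet_key_match_ops(sheet_names: List[str]) -> Dict[str, str]:
--     found, collapsed_map = {}, {}
--     for s in sheet_names: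
--         key = s.lower().replace("&","and").replace("-"," ").replace("_"," ").strip()
--         key = " ".join(key.split())
--         collapsed_map[key] = s
--     for key, variants in EXPECTED_SHEETS_OPS.items():
--         for v in variants:
--             for collapsed, original in collapsed_map.items():
--                 if v == collapsed:
--                     found[key] = original
--                     break
--             if key in found:
--                 break
--     return found
-- ===== SOURCE B (Python) =====
-- from typing import Dict, List
--
-- EXPECTED_SHEETS_OPS = {
--     "ta_recovery":      ["ta recovery", "ta_recovery", "ta"],
--     "business_report":  ["business report", "business_report", "business"],
--     "rep_verification": ["rep verification", "rep_verification", "rep verification "],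
--     "heat_map":         ["heat map", "heatmap", "heat map "],  # display only
-- }
--
-- # Inverted index: raw variant string -> (expected key, rank of the variant).
-- _VARIANT_INDEX = {
--     v: (key, rank)
--     for key, variants in EXPECTED_SHEETS_OPS.items()
--     for rank, v in enumerate(variants)
-- }
--
-- def sheet_key_match_ops(sheet_names: List[str]) -> Dict[str, str]:
--     best = {}  # key -> (rank, original sheet name)
--     for s in sheet_names:
--         c = s.lower().replace("&", "and").replace("-", " ").replace("_", " ").strip()
--         c = " ".join(c.split())
--         hit = _VARIANT_INDEX.get(c)
--         if hit is not None:
--             key, rank = hit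
--             if key not in best or rank <= best[key][0]:
--                 best[key] = (rank, s)
--     return {key: best[key][1] for key in EXPECTED_SHEETS_OPS if key in best}
-- ===== Notes on version B (the rewrite author's own statement) =====
-- stated objective: faster
-- what changed: Replaced A's triple-nested scan (for each expected key, for each variant, scan the whole collapsed map) by a one-time inverted index variant->(key,rank) and a single pass over sheet_names keeping the best (lowest-rank, latest) match per key.
import Mathlib
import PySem

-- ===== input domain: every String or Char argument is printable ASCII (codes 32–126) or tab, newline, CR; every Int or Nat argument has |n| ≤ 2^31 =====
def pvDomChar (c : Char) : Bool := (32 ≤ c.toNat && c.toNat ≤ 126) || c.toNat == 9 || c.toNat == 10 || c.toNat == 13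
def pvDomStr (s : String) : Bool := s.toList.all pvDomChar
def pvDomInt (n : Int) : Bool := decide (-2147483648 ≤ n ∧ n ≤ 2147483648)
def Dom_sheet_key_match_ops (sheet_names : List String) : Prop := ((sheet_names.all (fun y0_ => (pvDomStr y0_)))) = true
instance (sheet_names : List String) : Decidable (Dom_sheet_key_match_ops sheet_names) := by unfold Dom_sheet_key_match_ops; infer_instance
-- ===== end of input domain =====

-- B replaces A's triple-nested scan by a one-time inverted index (variant -> (key, rank)) and a
-- single pass over sheet_names keeping the best (lowest-rank, latest) match per key; same return value.

def EXPECTED_SHEETS_OPS : List (String × List String) :=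
  [("ta_recovery",      ["ta recovery", "ta_recovery", "ta"]),
   ("business_report",  ["business report", "business_report", "business"]),
   ("rep_verification", ["rep verification", "rep_verification", "rep verification "]),
   ("heat_map",         ["heat map", "heatmap", "heat map "])]

-- s.lower().replace("&","and").replace("-"," ").replace("_"," ").strip(); " ".join(key.split())
def pvCollapse (s : String) : String :=
  PySem.Str.join " " (PySem.Str.split₀ (PySem.Str.strip
    (PySem.Str.replace (PySem.Str.replace (PySem.Str.replace (PySem.Str.lower s) "&" "and") "-" " ") "_" " ")))

-- ===== PORT A =====
-- 'for v in variants: for collapsed, original in collapsed_map.items(): if v == collapsed: found[key]=original; break; if key in found: break'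
def pvFindVariant (cm : PySem.Dict String String) : List String → Option String
  | [] => none
  | v :: rest =>
    match (PySem.Dict.items cm).find? (fun p => p.1 == v) with
    | some p => some p.2
    | none => pvFindVariant cm rest

def sheet_key_match_ops (sheet_names : List String) : List (String × String) :=
  let cm := sheet_names.foldl (fun d s => PySem.Dict.insert d (pvCollapse s) s) PySem.Dict.empty
  let found := EXPECTED_SHEETS_OPS.foldl (fun f kv =>
      match pvFindVariant cm kv.2 with
      | some orig => PySem.Dict.insert f kv.1 orig
      | none => f) PySem.Dict.empty
  PySem.Dict.items found

-- ===== PORT B =====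
-- _VARIANT_INDEX = {v: (key, rank) for key, variants in EXPECTED_SHEETS_OPS.items() for rank, v in enumerate(variants)}
def pvVariantIndex : PySem.Dict String (String × Int) :=
  EXPECTED_SHEETS_OPS.foldl (fun d kv =>
    (PySem.List.enumerate kv.2).foldl (fun d rv => PySem.Dict.insert d rv.2 (kv.1, rv.1)) d)
    PySem.Dict.empty

def pvStepBest (bd : PySem.Dict String (Int × String)) (s : String) : PySem.Dict String (Int × String) :=
  match PySem.Dict.get? pvVariantIndex (pvCollapse s) with
  | some kr =>
    match PySem.Dict.get? bd kr.1 with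
    | some rs => if kr.2 ≤ rs.1 then PySem.Dict.insert bd kr.1 (kr.2, s) else bd
    | none => PySem.Dict.insert bd kr.1 (kr.2, s)
  | none => bd

def sheet_key_match_ops_alt (sheet_names : List String) : List (String × String) :=
  let best := sheet_names.foldl pvStepBest PySem.Dict.empty
  EXPECTED_SHEETS_OPS.foldl (fun acc kv =>
    match PySem.Dict.get? best kv.1 with
    | some rs => acc ++ [(kv.1, rs.2)]
    | none => acc) []

-- ===== PRECONDITION & SPEC =====
def Spec_sheet_key_match_ops (sheet_names : List String) (out : List (String × String)) : Prop := out = sheet_key_match_ops_alt sheet_names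
instance (sheet_names : List String) (out : List (String × String)) : Decidable (Spec_sheet_key_match_ops sheet_names out) := by unfold Spec_sheet_key_match_ops; infer_instance

-- ===== CLAIM (what is proved, stated in full; the proofs are below) =====
def Claim_equal_sheet_key_match_ops : Prop := ∀ (sheet_names : List String), Dom_sheet_key_match_ops sheet_names → Spec_sheet_key_match_ops sheet_names (sheet_key_match_ops sheet_names)

-- ===== LEMMAS AND PROOFS =====

-- invariant tying A's collapsed map to B's best dict, per expected key:
-- if B's best has no entry for k, no variant of k is a key of cm; if it has (r, s),
-- then r ≥ 0, all variants of rank < r miss cm, and the rank-r variant maps to s.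
def KeyInv (k : String) (vs : List String) (cm : PySem.Dict String String)
    (bd : PySem.Dict String (Int × String)) : Prop :=
  (PySem.Dict.get? bd k = none → ∀ v ∈ vs, PySem.Dict.get? cm v = none) ∧
  (∀ r s, PySem.Dict.get? bd k = some (r, s) → 0 ≤ r ∧
     (∀ v ∈ vs.take r.toNat, PySem.Dict.get? cm v = none) ∧
     ∃ v, vs[r.toNat]? = some v ∧ PySem.Dict.get? cm v = some s)

lemma idx_complete (k : String) (vs : List String) (hm : (k, vs) ∈ EXPECTED_SHEETS_OPS)
    (i : Nat) (c : String) (hc : vs[i]? = some c) :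
    PySem.Dict.get? pvVariantIndex c = some (k, (i : Int)) := by
  fin_cases hm <;> (rcases i with _ | _ | _ | i <;> simp_all <;> subst hc <;> decide)

lemma idx_sound (c : String) (kr : String × Int)
    (h : PySem.Dict.get? pvVariantIndex c = some kr) :
    ∃ vs, (kr.1, vs) ∈ EXPECTED_SHEETS_OPS ∧ 0 ≤ kr.2 ∧ vs[kr.2.toNat]? = some c := by
  have hmem : (c, kr) ∈ pvVariantIndex.items := PySem.Dict.mem_items_of_get?_eq_some _ h
  fin_cases hmem <;>
    first
    | exact ⟨["ta recovery", "ta_recovery", "ta"], by decide⟩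
    | exact ⟨["business report", "business_report", "business"], by decide⟩
    | exact ⟨["rep verification", "rep_verification", "rep verification "], by decide⟩
    | exact ⟨["heat map", "heatmap", "heat map "], by decide⟩

lemma keyUnique (k : String) (vs vs' : List String) (h : (k, vs) ∈ EXPECTED_SHEETS_OPS)
    (h' : (k, vs') ∈ EXPECTED_SHEETS_OPS) : vs = vs' := by
  simp only [EXPECTED_SHEETS_OPS, List.mem_cons, List.not_mem_nil, or_false,
    Prod.mk.injEq] at h h'
  rcases h with ⟨hk, hv⟩ | ⟨hk, hv⟩ | ⟨hk, hv⟩ | ⟨hk, hv⟩ <;>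
    rcases h' with ⟨hk', hv'⟩ | ⟨hk', hv'⟩ | ⟨hk', hv'⟩ | ⟨hk', hv'⟩ <;> simp_all

lemma nodup_variants (k : String) (vs : List String) (hm : (k, vs) ∈ EXPECTED_SHEETS_OPS) :
    vs.Nodup := by fin_cases hm <;> decide

lemma getElem?_nodup_ne (vs : List String) (hnd : vs.Nodup) (i j : Nat) (a b : String)
    (ha : vs[i]? = some a) (hb : vs[j]? = some b) (hij : i ≠ j) : a ≠ b := by
  intro hab
  subst hab
  obtain ⟨hi, hgi⟩ := List.getElem?_eq_some_iff.mp ha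
  obtain ⟨hj, hgj⟩ := List.getElem?_eq_some_iff.mp hb
  exact hij (hnd.getElem_inj_iff.mp (hgi.trans hgj.symm))

lemma take_ne (vs : List String) (hnd : vs.Nodup) (n m : Nat) (c w : String)
    (hn : vs[n]? = some c) (hw : w ∈ vs.take m) (hm : m ≤ n) : w ≠ c := by
  obtain ⟨i, hi, hgi⟩ := List.mem_take_iff_getElem.mp hw
  exact getElem?_nodup_ne vs hnd i n w c
    (List.getElem?_eq_some_iff.mpr ⟨by omega, hgi⟩) hn (by omega)

lemma mem_take_mono (vs : List String) (m n : Nat) (h : m ≤ n) (w : String)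
    (hw : w ∈ vs.take m) : w ∈ vs.take n := by
  obtain ⟨i, hi, hgi⟩ := List.mem_take_iff_getElem.mp hw
  exact List.mem_take_iff_getElem.mpr ⟨i, by omega, hgi⟩

lemma keyinv_empty (k : String) (vs : List String) :
    KeyInv k vs PySem.Dict.empty PySem.Dict.empty := by
  constructor
  · intro _ v _; exact PySem.Dict.get?_empty v
  · intro r s h; rw [PySem.Dict.get?_empty] at h; exact absurd h (by simp)

-- preservation when the new collapsed name is not a variant of k and best's entry at k is unchanged
lemma keyinv_preserve (k : String) (vs : List String) (cm : PySem.Dict String String)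
    (bd bd' : PySem.Dict String (Int × String)) (h : KeyInv k vs cm bd) (c x : String)
    (hc : ∀ v ∈ vs, v ≠ c) (hbd : PySem.Dict.get? bd' k = PySem.Dict.get? bd k) :
    KeyInv k vs (PySem.Dict.insert cm c x) bd' := by
  obtain ⟨h0, h1⟩ := h
  constructor
  · intro hb v hv
    rw [PySem.Dict.get?_insert_of_ne cm x (hc v hv)]
    exact h0 (hbd ▸ hb) v hv
  · intro r s hb
    obtain ⟨hr0, hpre, v, hv, hcv⟩ := h1 r s (hbd ▸ hb)
    refine ⟨hr0, ?_, v, hv, ?_⟩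
    · intro w hw
      rw [PySem.Dict.get?_insert_of_ne cm x (hc w (List.mem_of_mem_take hw))]
      exact hpre w hw
    · rw [PySem.Dict.get?_insert_of_ne cm x (hc v (List.mem_of_getElem? hv))]
      exact hcv

lemma pvStepBest_none (bd : PySem.Dict String (Int × String)) (s : String)
    (h : PySem.Dict.get? pvVariantIndex (pvCollapse s) = none) : pvStepBest bd s = bd := by
  unfold pvStepBest; rw [h]

lemma pvStepBest_some (bd : PySem.Dict String (Int × String)) (s : String) (kr : String × Int)
    (h : PySem.Dict.get? pvVariantIndex (pvCollapse s) = some kr) :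
    pvStepBest bd s =
      (match PySem.Dict.get? bd kr.1 with
       | some rs => if kr.2 ≤ rs.1 then PySem.Dict.insert bd kr.1 (kr.2, s) else bd
       | none => PySem.Dict.insert bd kr.1 (kr.2, s)) := by
  unfold pvStepBest; rw [h]

lemma keyinv_step (k : String) (vs : List String) (hm : (k, vs) ∈ EXPECTED_SHEETS_OPS)
    (cm : PySem.Dict String String) (bd : PySem.Dict String (Int × String))
    (h : KeyInv k vs cm bd) (s : String) :
    KeyInv k vs (PySem.Dict.insert cm (pvCollapse s) s) (pvStepBest bd s) := by
  have hnd := nodup_variants k vs hm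
  cases hidx : PySem.Dict.get? pvVariantIndex (pvCollapse s) with
  | none =>
    have hb : pvStepBest bd s = bd := pvStepBest_none bd s hidx
    rw [hb]
    refine keyinv_preserve k vs cm bd bd h _ s ?_ rfl
    intro v hv hEq
    obtain ⟨i, hi, hgi⟩ := List.getElem_of_mem hv
    have hix := idx_complete k vs hm i v (List.getElem?_eq_some_iff.mpr ⟨hi, hgi⟩)
    rw [hEq, hidx] at hix
    cases hix
  | some kr =>
    obtain ⟨vs', hm', hkr0, hvc⟩ := idx_sound (pvCollapse s) kr hidx
    by_cases hkk : kr.1 = k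
    · -- the new sheet's collapsed name is the rank-kr.2 variant of k
      have hvs : vs' = vs := keyUnique k vs' vs (hkk ▸ hm') hm
      rw [hvs] at hvc
      obtain ⟨h0, h1⟩ := h
      have hins : ∀ w ∈ vs.take kr.2.toNat,
          PySem.Dict.get? (PySem.Dict.insert cm (pvCollapse s) s) w = PySem.Dict.get? cm w := by
        intro w hw
        exact PySem.Dict.get?_insert_of_ne cm s
          (take_ne vs hnd kr.2.toNat kr.2.toNat (pvCollapse s) w hvc hw le_rfl)
      cases hbd : PySem.Dict.get? bd k with
      | none =>
        have hb : pvStepBest bd s = PySem.Dict.insert bd k (kr.2, s) := by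
          rw [pvStepBest_some bd s kr hidx, hkk]; simp only [hbd]
        rw [hb]
        constructor
        · intro habs; rw [PySem.Dict.get?_insert_self] at habs; cases habs
        · intro r' s' hb'
          rw [PySem.Dict.get?_insert_self] at hb'
          simp only [Option.some.injEq, Prod.mk.injEq] at hb'
          obtain ⟨hr, hs⟩ := hb'
          subst hr hs
          refine ⟨hkr0, ?_, pvCollapse s, hvc, by rw [PySem.Dict.get?_insert_self]⟩
          intro w hw
          rw [hins w hw]
          exact h0 hbd w (List.mem_of_mem_take hw)
      | some rs =>
        obtain ⟨r0, s0⟩ := rs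
        obtain ⟨hr00, hpre, v0, hv0, hcv0⟩ := h1 r0 s0 (by rw [hbd])
        by_cases hle : kr.2 ≤ r0
        · have hb : pvStepBest bd s = PySem.Dict.insert bd k (kr.2, s) := by
            rw [pvStepBest_some bd s kr hidx, hkk]; simp only [hbd, if_pos hle]
          rw [hb]
          constructor
          · intro habs; rw [PySem.Dict.get?_insert_self] at habs; cases habs
          · intro r' s' hb'
            rw [PySem.Dict.get?_insert_self] at hb'
            simp only [Option.some.injEq, Prod.mk.injEq] at hb'
            obtain ⟨hr, hs⟩ := hb'
            subst hr hs
            refine ⟨hkr0, ?_, pvCollapse s, hvc, by rw [PySem.Dict.get?_insert_self]⟩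
            intro w hw
            rw [hins w hw]
            exact hpre w (mem_take_mono vs kr.2.toNat r0.toNat (by omega) w hw)
        · have hb : pvStepBest bd s = bd := by
            rw [pvStepBest_some bd s kr hidx, hkk]; simp only [hbd, if_neg hle]
          rw [hb]
          constructor
          · intro habs; rw [habs] at hbd; cases hbd
          · intro r' s' hb'
            rw [hbd] at hb'
            simp only [Option.some.injEq, Prod.mk.injEq] at hb'
            obtain ⟨hr, hs⟩ := hb'
            subst hr hs
            refine ⟨hr00, ?_, v0, hv0, ?_⟩
            · intro w hw
              rw [PySem.Dict.get?_insert_of_ne cm s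
                (take_ne vs hnd kr.2.toNat r0.toNat (pvCollapse s) w hvc hw (by omega))]
              exact hpre w hw
            · rw [PySem.Dict.get?_insert_of_ne cm s
                (getElem?_nodup_ne vs hnd r0.toNat kr.2.toNat v0 (pvCollapse s) hv0 hvc (by omega))]
              exact hcv0
    · -- a variant of a different key: best's entry at k is untouched
      have hc : ∀ v ∈ vs, v ≠ pvCollapse s := by
        intro v hv hEq
        obtain ⟨i, hi, hgi⟩ := List.getElem_of_mem hv
        have hix := idx_complete k vs hm i v (List.getElem?_eq_some_iff.mpr ⟨hi, hgi⟩)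
        rw [hEq, hidx] at hix
        exact hkk (congrArg Prod.fst (Option.some.inj hix))
      have hget : PySem.Dict.get? (pvStepBest bd s) k = PySem.Dict.get? bd k := by
        cases hbd2 : PySem.Dict.get? bd kr.1 with
        | none =>
          have hb : pvStepBest bd s = PySem.Dict.insert bd kr.1 (kr.2, s) := by
            rw [pvStepBest_some bd s kr hidx]; simp only [hbd2]
          rw [hb]
          exact PySem.Dict.get?_insert_of_ne bd (kr.2, s) (fun e => hkk e.symm)
        | some rs =>
          by_cases hle : kr.2 ≤ rs.1
          · have hb : pvStepBest bd s = PySem.Dict.insert bd kr.1 (kr.2, s) := by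
              rw [pvStepBest_some bd s kr hidx]; simp only [hbd2, if_pos hle]
            rw [hb]
            exact PySem.Dict.get?_insert_of_ne bd (kr.2, s) (fun e => hkk e.symm)
          · have hb : pvStepBest bd s = bd := by
              rw [pvStepBest_some bd s kr hidx]; simp only [hbd2, if_neg hle]
            rw [hb]
      exact keyinv_preserve k vs cm bd _ h _ s hc hget

set_option maxHeartbeats 1000000 in
lemma keyinv_fold (k : String) (vs : List String) (hm : (k, vs) ∈ EXPECTED_SHEETS_OPS)
    (names : List String) (cm : PySem.Dict String String) (bd : PySem.Dict String (Int × String))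
    (h : KeyInv k vs cm bd) :
    KeyInv k vs (names.foldl (fun d s => PySem.Dict.insert d (pvCollapse s) s) cm)
      (names.foldl pvStepBest bd) := by
  induction names generalizing cm bd with
  | nil => exact h
  | cons x xs ih =>
    simp only [List.foldl_cons]
    exact ih _ _ (keyinv_step k vs hm cm bd h x)

lemma find_items_eq_get? (cm : PySem.Dict String String) (hnd : cm.keys.Nodup) (v : String) :
    ((PySem.Dict.items cm).find? (fun p => p.1 == v)).map Prod.snd = PySem.Dict.get? cm v := by
  cases hf : (PySem.Dict.items cm).find? (fun p => p.1 == v) with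
  | none =>
    rw [List.find?_eq_none] at hf
    have : v ∉ cm.keys := by
      intro hv
      simp only [PySem.Dict.keys, List.mem_map] at hv
      obtain ⟨p, hp, hpe⟩ := hv
      exact hf p hp (by simp [hpe])
    simp [(PySem.Dict.get?_eq_none_iff_not_mem_keys cm v).mpr this]
  | some p =>
    have hpv : p.1 = v := by have := List.find?_some hf; simpa using this
    have hp : p ∈ PySem.Dict.items cm := List.mem_of_find?_eq_some hf
    have : PySem.Dict.get? cm v = some p.2 :=
      PySem.Dict.get?_of_mem_items cm (by rw [← hpv]; exact hp) hnd
    simp [this]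

lemma findVariant_none (cm : PySem.Dict String String) (hnd : cm.keys.Nodup)
    (vs : List String) (h : ∀ v ∈ vs, PySem.Dict.get? cm v = none) :
    pvFindVariant cm vs = none := by
  induction vs with
  | nil => rfl
  | cons v rest ih =>
    have hb := find_items_eq_get? cm hnd v
    rw [h v (by simp)] at hb
    have hf : (PySem.Dict.items cm).find? (fun p => p.1 == v) = none := by
      cases hfv : (PySem.Dict.items cm).find? (fun p => p.1 == v) <;> simp_all
    simp [pvFindVariant, hf]
    exact ih (fun w hw => h w (by simp [hw]))

lemma findVariant_some (cm : PySem.Dict String String) (hnd : cm.keys.Nodup)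
    (vs : List String) (n : Nat) (s : String)
    (hpre : ∀ w ∈ vs.take n, PySem.Dict.get? cm w = none)
    (v : String) (hv : vs[n]? = some v) (hcv : PySem.Dict.get? cm v = some s) :
    pvFindVariant cm vs = some s := by
  induction vs generalizing n with
  | nil => simp at hv
  | cons w rest ih =>
    cases n with
    | zero =>
      have hwv : w = v := by simpa using hv
      subst hwv
      have hb := find_items_eq_get? cm hnd w
      rw [hcv] at hb
      obtain ⟨p, hf, hps⟩ : ∃ p, (PySem.Dict.items cm).find? (fun q => q.1 == w) = some p ∧ p.2 = s := by
        cases hfv : (PySem.Dict.items cm).find? (fun q => q.1 == w) <;> simp_all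
      simp [pvFindVariant, hf, hps]
    | succ m =>
      have hw : PySem.Dict.get? cm w = none := hpre w (by simp)
      have hb := find_items_eq_get? cm hnd w
      rw [hw] at hb
      have hf : (PySem.Dict.items cm).find? (fun q => q.1 == w) = none := by
        cases hfv : (PySem.Dict.items cm).find? (fun q => q.1 == w) <;> simp_all
      simp only [pvFindVariant, hf]
      exact ih m (fun u hu => hpre u (by simp [hu])) (by simpa using hv)

lemma findVariant_of_keyinv (k : String) (vs : List String)
    (cm : PySem.Dict String String) (hnd : cm.keys.Nodup)
    (bd : PySem.Dict String (Int × String)) (h : KeyInv k vs cm bd) :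
    pvFindVariant cm vs = (PySem.Dict.get? bd k).map Prod.snd := by
  cases hbd : PySem.Dict.get? bd k with
  | none => simp [findVariant_none cm hnd vs (h.1 hbd)]
  | some rs =>
    obtain ⟨hr0, hpre, v, hv, hcv⟩ := h.2 rs.1 rs.2 (by rw [hbd])
    simp [findVariant_some cm hnd vs rs.1.toNat rs.2 hpre v hv hcv]

-- ===== VERDICT (by name: the statement is the Claim_ definition above) =====
theorem sheet_key_match_ops_spec : Claim_equal_sheet_key_match_ops := by
  intro names _
  unfold Spec_sheet_key_match_ops sheet_key_match_ops sheet_key_match_ops_alt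
  have hnd : (names.foldl (fun d s => PySem.Dict.insert d (pvCollapse s) s) PySem.Dict.empty).keys.Nodup :=
    PySem.Dict.nodup_keys_foldl_insert_key names pvCollapse _ _ PySem.Dict.nodup_keys_empty
  have hf : ∀ k vs, (k, vs) ∈ EXPECTED_SHEETS_OPS →
      pvFindVariant (names.foldl (fun d s => PySem.Dict.insert d (pvCollapse s) s) PySem.Dict.empty) vs
        = (PySem.Dict.get? (names.foldl pvStepBest PySem.Dict.empty) k).map Prod.snd := by
    intro k vs hm
    exact findVariant_of_keyinv k vs _ hnd _ (keyinv_fold k vs hm names _ _ (keyinv_empty k vs))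
  simp only [EXPECTED_SHEETS_OPS, List.foldl]
  rw [hf "ta_recovery" ["ta recovery", "ta_recovery", "ta"] (by decide),
      hf "business_report" ["business report", "business_report", "business"] (by decide),
      hf "rep_verification" ["rep verification", "rep_verification", "rep verification "] (by decide),
      hf "heat_map" ["heat map", "heatmap", "heat map "] (by decide)]
  rcases h1 : PySem.Dict.get? (names.foldl pvStepBest PySem.Dict.empty) "ta_recovery" with _ | rs1 <;>
  rcases h2 : PySem.Dict.get? (names.foldl pvStepBest PySem.Dict.empty) "business_report" with _ | rs2 <;>
  rcases h3 : PySem.Dict.get? (names.foldl pvStepBest PySem.Dict.empty) "rep_verification" with _ | rs3 <;>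
  rcases h4 : PySem.Dict.get? (names.foldl pvStepBest PySem.Dict.empty) "heat_map" with _ | rs4 <;>
  simp [PySem.Dict.items_insert_of_not_contains, PySem.Dict.contains_insert,    PySem.Dict.empty]
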